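-- pv_equiv track=rewrite | github.com/mouaammou/Dynamic-programming | SOFTWARE ENGINNER TESTS/test-03.py | isAlphabeticPalindrome
-- ===== SOURCE A (Python) =====
-- def isAlphabeticPalindrome(code):
--     # Write your code here
--     alpha_array = []
--     for letter in code:
--         if ord(letter) < 33 or ord(letter) > 126:
--             return 0
--         if 'a' <= letter <= 'z' or 'A' <= letter <= 'Z':
--             alpha_array.append(letter.lower())
--     # [start:stop:step] adds a step value, which tells Python how to move through the list.
--     return int(alpha_array == alpha_array[::-1])
-- ===== SOURCE B (Python) =====
-- def isAlphabeticPalindrome(code):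
--     if any(ord(ch) < 33 or ord(ch) > 126 for ch in code):
--         return 0
--     i, j = 0, len(code) - 1
--     while i < j:
--         if not code[i].isalpha():
--             i += 1
--         elif not code[j].isalpha():
--             j -= 1
--         elif code[i].lower() != code[j].lower():
--             return 0
--         else:
--             i += 1
--             j -= 1
--     return 1
-- ===== Notes on version B (the rewrite author's own statement) =====
-- stated objective: alternative
-- what changed: A builds a filtered lowercased list and compares it with its reversed copy; B builds no intermediate list at all: after one validity pass it walks the ORIGINAL string with two inward-moving pointers that skip non-alphabetic characters in place and compare lowercased letters pair by pair.
import Mathlib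
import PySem

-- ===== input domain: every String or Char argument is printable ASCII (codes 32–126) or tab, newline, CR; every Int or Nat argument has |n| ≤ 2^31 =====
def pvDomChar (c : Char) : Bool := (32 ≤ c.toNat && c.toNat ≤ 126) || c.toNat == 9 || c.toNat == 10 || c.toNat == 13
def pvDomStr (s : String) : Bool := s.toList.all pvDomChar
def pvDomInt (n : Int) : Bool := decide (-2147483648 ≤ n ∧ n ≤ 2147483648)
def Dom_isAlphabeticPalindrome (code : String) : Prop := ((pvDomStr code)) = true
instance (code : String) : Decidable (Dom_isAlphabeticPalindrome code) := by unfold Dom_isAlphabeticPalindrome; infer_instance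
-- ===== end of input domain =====

-- B builds no intermediate letter list: a validity pass, then two inward-moving
-- pointers on the original string that skip non-alphabetic characters in place.

-- ===== PORT A =====
-- loop over code with early return 0, collecting lowercased letters into acc,
-- then int(alpha_array == alpha_array[::-1])
def pvGoA : List Char → List Char → Int
  | [], acc => if acc = acc.reverse then 1 else 0
  | c :: rest, acc =>
      if c.toNat < 33 ∨ c.toNat > 126 then 0
      else if ('a' ≤ c ∧ c ≤ 'z') ∨ ('A' ≤ c ∧ c ≤ 'Z') then
        pvGoA rest (acc ++ [PySem.Chars.lowerChar c])
      else pvGoA rest acc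

def isAlphabeticPalindrome (code : String) : Int := pvGoA code.toList []

-- ===== PORT B =====
-- while i < j: skip non-alpha at i, skip non-alpha at j, else compare lowered pair
def pvSkip (xs : List Char) (i j : Nat) : Int :=
  if _h : i < j then
    if ¬ PySem.Chars.isalpha (xs.getD i ' ') then pvSkip xs (i + 1) j
    else if ¬ PySem.Chars.isalpha (xs.getD j ' ') then pvSkip xs i (j - 1)
    else if PySem.Chars.lowerChar (xs.getD i ' ') ≠ PySem.Chars.lowerChar (xs.getD j ' ') then 0
    else pvSkip xs (i + 1) (j - 1)
  else 1
termination_by j - i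

-- if any(ord(ch) < 33 or ord(ch) > 126 for ch in code): return 0, then the pointer walk
def isAlphabeticPalindrome_alt (code : String) : Int :=
  if code.toList.any (fun c => decide (c.toNat < 33) || decide (126 < c.toNat)) then 0
  else pvSkip code.toList 0 (code.toList.length - 1)

-- ===== PRECONDITION & SPEC =====
def Spec_isAlphabeticPalindrome (code : String) (out : Int) : Prop := out = isAlphabeticPalindrome_alt code
instance (code : String) (out : Int) : Decidable (Spec_isAlphabeticPalindrome code out) := by unfold Spec_isAlphabeticPalindrome; infer_instance

-- ===== CLAIM (what is proved, stated in full; the proofs are below) =====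
def Claim_equal_isAlphabeticPalindrome : Prop := ∀ (code : String), Dom_isAlphabeticPalindrome code → Spec_isAlphabeticPalindrome code (isAlphabeticPalindrome code)

-- ===== LEMMAS AND PROOFS =====

-- the lowercased alphabetic subsequence of a char list
def pvFl (l : List Char) : List Char :=
  l.filterMap (fun c =>
    if ('a' ≤ c ∧ c ≤ 'z') ∨ ('A' ≤ c ∧ c ≤ 'Z') then some (PySem.Chars.lowerChar c) else none)

theorem pv_isalpha_iff (c : Char) :
    PySem.Chars.isalpha c = true ↔ (('a' ≤ c ∧ c ≤ 'z') ∨ ('A' ≤ c ∧ c ≤ 'Z')) := by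
  simp [PySem.Chars.isalpha, PySem.Chars.isupper, PySem.Chars.islower]
  tauto

-- A's loop equals: whole-string validity test, then the reverse comparison of acc ++ pvFl l
theorem pvGoA_eq (l : List Char) : ∀ acc, pvGoA l acc =
    (if l.any (fun c => decide (c.toNat < 33) || decide (126 < c.toNat)) then 0
     else if (acc ++ pvFl l) = (acc ++ pvFl l).reverse then (1 : Int) else 0) := by
  induction l with
  | nil => intro acc; simp [pvGoA, pvFl]
  | cons c rest ih =>
    intro acc
    rw [pvGoA]
    by_cases hv : c.toNat < 33 ∨ c.toNat > 126
    · rw [if_pos hv]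
      have : (c :: rest).any (fun c => decide (c.toNat < 33) || decide (126 < c.toNat)) = true := by
        simp only [List.any_cons, Bool.or_eq_true, decide_eq_true_eq]
        left; omega
      rw [this]; rfl
    · rw [if_neg hv]
      have hc : (decide (c.toNat < 33) || decide (126 < c.toNat)) = false := by
        simp only [Bool.or_eq_false_iff, decide_eq_false_iff_not]; omega
      have hany : (c :: rest).any (fun c => decide (c.toNat < 33) || decide (126 < c.toNat)) =
          rest.any (fun c => decide (c.toNat < 33) || decide (126 < c.toNat)) := by
        simp only [List.any_cons, hc, Bool.false_or]
      by_cases ha : ('a' ≤ c ∧ c ≤ 'z') ∨ ('A' ≤ c ∧ c ≤ 'Z')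
      · rw [if_pos ha, ih, hany]
        have : pvFl (c :: rest) = PySem.Chars.lowerChar c :: pvFl rest := by
          simp [pvFl, ha]
        rw [this]
        have : acc ++ PySem.Chars.lowerChar c :: pvFl rest =
            (acc ++ [PySem.Chars.lowerChar c]) ++ pvFl rest := by simp
        rw [this]
      · rw [if_neg ha, ih, hany]
        have : pvFl (c :: rest) = pvFl rest := by
          simp [pvFl, ha]
        rw [this]

theorem pv_rev_self_of_len_le_one (l : List Char) (h : l.length ≤ 1) : l = l.reverse := by
  match l with
  | [] => rfl
  | [a] => rfl
  | a :: b :: t => simp at h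

theorem pv_pal_cons_concat (c d : Char) (m : List Char) :
    (c :: (m ++ [d]) = (c :: (m ++ [d])).reverse) ↔ (c = d ∧ m = m.reverse) := by
  have hrev : (c :: (m ++ [d])).reverse = d :: (m.reverse ++ [c]) := by simp
  rw [hrev, List.cons.injEq]
  constructor
  · rintro ⟨h1, h2⟩
    subst h1
    exact ⟨rfl, (List.append_left_inj _).mp h2⟩
  · rintro ⟨h1, h2⟩
    subst h1
    exact ⟨rfl, by rw [← h2]⟩

-- the pointer walk over xs[i..j] equals the reverse test on pvFl of that segment
theorem pvSkip_seg (xs : List Char) (i j : Nat) (hj : j < xs.length) :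
    pvSkip xs i j =
      (if pvFl ((xs.drop i).take (j + 1 - i)) = (pvFl ((xs.drop i).take (j + 1 - i))).reverse
       then (1 : Int) else 0) := by
  rw [pvSkip]
  split
  · rename_i hij
    have hi : i < xs.length := by omega
    have hdrop : xs.drop i = xs[i] :: xs.drop (i + 1) := by
      rw [List.drop_eq_getElem_cons hi]
    have e1 : j + 1 - i = (j - i - 1 + 1) + 1 := by omega
    have e2 : j - i = j - i - 1 + 1 := by omega
    have hmid : (xs.drop (i + 1)).take (j - i) =
        (xs.drop (i + 1)).take (j - i - 1) ++ [xs[j]] := by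
      rw [e2, List.take_add_one]
      congr 1
      have : (xs.drop (i + 1))[j - i - 1]? = xs[j]? := by
        rw [List.getElem?_drop]
        congr 1
        omega
      rw [this, List.getElem?_eq_getElem hj]
      rfl
    have hseg : (xs.drop i).take (j + 1 - i) =
        xs[i] :: ((xs.drop (i + 1)).take (j - i - 1) ++ [xs[j]]) := by
      rw [hdrop, e1, List.take_succ_cons, ← e2, hmid]
    have hgi : xs.getD i ' ' = xs[i] := List.getD_eq_getElem xs ' ' hi
    have hgj : xs.getD j ' ' = xs[j] := List.getD_eq_getElem xs ' ' hj
    rw [hgi, hgj, hseg]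
    by_cases hai : ('a' ≤ xs[i] ∧ xs[i] ≤ 'z') ∨ ('A' ≤ xs[i] ∧ xs[i] ≤ 'Z')
    · rw [if_neg (by simp [(pv_isalpha_iff xs[i]).mpr hai])]
      by_cases haj : ('a' ≤ xs[j] ∧ xs[j] ≤ 'z') ∨ ('A' ≤ xs[j] ∧ xs[j] ≤ 'Z')
      · rw [if_neg (by simp [(pv_isalpha_iff xs[j]).mpr haj])]
        have hflseg : pvFl (xs[i] :: ((xs.drop (i + 1)).take (j - i - 1) ++ [xs[j]])) =
            PySem.Chars.lowerChar xs[i] ::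
              (pvFl ((xs.drop (i + 1)).take (j - i - 1)) ++ [PySem.Chars.lowerChar xs[j]]) := by
          simp [pvFl, List.filterMap_append, hai, haj]
        rw [hflseg]
        by_cases hcd : PySem.Chars.lowerChar xs[i] = PySem.Chars.lowerChar xs[j]
        · rw [if_neg (by simp [hcd])]
          have hrec := pvSkip_seg xs (i + 1) (j - 1) (by omega)
          have e3 : j - 1 + 1 - (i + 1) = j - i - 1 := by omega
          rw [hrec, e3]
          exact if_congr
            (((pv_pal_cons_concat _ _ _).trans (by simp [hcd])).symm) rfl rfl
        · rw [if_pos hcd]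
          rw [if_neg (fun hpal => hcd ((pv_pal_cons_concat _ _ _).mp hpal).1)]
      · rw [if_pos (by simp [pv_isalpha_iff, haj])]
        have hrec := pvSkip_seg xs i (j - 1) (by omega)
        have e4 : j - 1 + 1 - i = j - i := by omega
        have hseg' : (xs.drop i).take (j - i) =
            xs[i] :: (xs.drop (i + 1)).take (j - i - 1) := by
          rw [hdrop, e2, List.take_succ_cons]
          congr 2
        rw [hrec, e4, hseg']
        have hl : pvFl (xs[i] :: ((xs.drop (i + 1)).take (j - i - 1) ++ [xs[j]])) =
            pvFl (xs[i] :: (xs.drop (i + 1)).take (j - i - 1)) := by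
          simp [pvFl, List.filterMap_cons, List.filterMap_append, haj]
        rw [hl]
    · rw [if_pos (by simp [pv_isalpha_iff, hai])]
      have hrec := pvSkip_seg xs (i + 1) j hj
      have e5 : j + 1 - (i + 1) = j - i := by omega
      rw [hrec, e5, hmid]
      have hl : pvFl (xs[i] :: ((xs.drop (i + 1)).take (j - i - 1) ++ [xs[j]])) =
          pvFl ((xs.drop (i + 1)).take (j - i - 1) ++ [xs[j]]) := by
        simp [pvFl, List.filterMap_cons, hai]
      rw [hl]
  · rename_i hij
    have hlen : (pvFl ((xs.drop i).take (j + 1 - i))).length ≤ 1 := by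
      have h1 := List.length_filterMap_le
        (f := fun c => if ('a' ≤ c ∧ c ≤ 'z') ∨ ('A' ≤ c ∧ c ≤ 'Z')
                       then some (PySem.Chars.lowerChar c) else none)
        (l := (xs.drop i).take (j + 1 - i))
      have h2 : ((xs.drop i).take (j + 1 - i)).length ≤ 1 := by
        simp only [List.length_take, List.length_drop]
        omega
      calc (pvFl ((xs.drop i).take (j + 1 - i))).length ≤ _ := h1
        _ ≤ 1 := h2
    rw [if_pos (pv_rev_self_of_len_le_one _ hlen)]
termination_by j - i

-- ===== VERDICT (by name: the statement is the Claim_ definition above) =====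
theorem isAlphabeticPalindrome_spec : Claim_equal_isAlphabeticPalindrome := by
  intro code _dom
  show isAlphabeticPalindrome code = isAlphabeticPalindrome_alt code
  unfold isAlphabeticPalindrome isAlphabeticPalindrome_alt
  rw [pvGoA_eq]
  by_cases hv : code.toList.any (fun c => decide (c.toNat < 33) || decide (126 < c.toNat)) = true
  · rw [if_pos hv, if_pos hv]
  · rw [if_neg hv, if_neg hv]
    cases hxs : code.toList with
    | nil => rw [pvSkip]; simp [pvFl]
    | cons a t =>
      have h := pvSkip_seg (a :: t) 0 ((a :: t).length - 1) (by simp)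
      have e : (a :: t).length - 1 + 1 - 0 = (a :: t).length := by simp
      rw [h, e, List.drop_zero, List.take_length, List.nil_append]
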